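-- pv_equiv track=rewrite | github.com/Daniel-Ibarrola/leetcode | src/leetcode/sliding_window/character_replacement.py | _can_form_string_with_same_letters
-- ===== SOURCE A (Python) =====
-- def _can_form_string_with_same_letters(
--     char_count: dict[str, int], replacement_times: int
-- ):
--     max_count_char = max(char_count, key=char_count.get)
--     total_count = 0
--     for char, count in char_count.items():
--         if char != max_count_char:
--             total_count += count
--
--     return total_count <= replacement_times
-- ===== SOURCE B (Python) =====
-- def _can_form_string_with_same_letters(
--     char_count: dict[str, int], replacement_times: int
-- ):
--     total = sum(char_count.values())
--     return any(
--         total - count <= replacement_times for count in char_count.values()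
--     )
-- ===== Notes on version B (the rewrite author's own statement) =====
-- stated objective: alternative
-- what changed: Replaces the argmax lookup plus selective summing loop by an existence test with no max computation at all: B checks whether any single character's count can absorb all the others within the budget (any(total - count <= r)), which is equivalent because the test is monotone in count and so holds for some count iff it holds for the maximum.
import Mathlib
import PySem

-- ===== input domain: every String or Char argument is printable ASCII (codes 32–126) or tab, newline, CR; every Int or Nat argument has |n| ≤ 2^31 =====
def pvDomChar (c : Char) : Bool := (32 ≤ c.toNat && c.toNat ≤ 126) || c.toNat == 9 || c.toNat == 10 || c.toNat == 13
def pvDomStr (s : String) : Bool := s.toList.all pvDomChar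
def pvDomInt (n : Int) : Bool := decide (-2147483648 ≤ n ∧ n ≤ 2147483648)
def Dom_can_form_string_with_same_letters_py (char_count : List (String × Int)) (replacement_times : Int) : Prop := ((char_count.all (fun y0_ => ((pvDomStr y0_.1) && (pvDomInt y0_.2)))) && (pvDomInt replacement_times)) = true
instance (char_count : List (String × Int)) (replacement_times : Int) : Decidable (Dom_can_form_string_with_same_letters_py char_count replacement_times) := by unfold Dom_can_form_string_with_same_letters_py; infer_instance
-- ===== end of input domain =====

-- B replaces A's argmax lookup + selective summing loop by an existence test with no max
-- computation: does any single count absorb all the others within the budget? Return values only.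

-- ===== PORT A =====
-- max_count_char = max(char_count, key=char_count.get); char_count.get(c) always hits for
-- c a key of the dict, so the key function is getD with an irrelevant default.
def can_form_string_with_same_letters_py (char_count : List (String × Int)) (replacement_times : Int) : Bool :=
  let d := PySem.Dict.ofList char_count
  match PySem.List.max? d.keys (fun c => d.getD c 0) with
  | none => false  -- unreached under Pre_: Python's max raises ValueError on an empty dict
  | some max_count_char =>
    let total_count : Int := d.items.foldl (fun t p => if p.1 ≠ max_count_char then t + p.2 else t) 0
    decide (total_count ≤ replacement_times)

-- ===== PORT B =====
def can_form_string_with_same_letters_py_alt (char_count : List (String × Int)) (replacement_times : Int) : Bool :=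
  let vals := (PySem.Dict.ofList char_count).values
  let total := vals.foldl (· + ·) 0
  vals.any (fun count => decide (total - count ≤ replacement_times))

-- ===== PRECONDITION & SPEC =====
-- On the empty dict A raises ValueError (max of an empty sequence); excluded.
def Pre_can_form_string_with_same_letters_py (char_count : List (String × Int)) (replacement_times : Int) : Prop := char_count ≠ []
instance (char_count : List (String × Int)) (replacement_times : Int) : Decidable (Pre_can_form_string_with_same_letters_py char_count replacement_times) := by unfold Pre_can_form_string_with_same_letters_py; infer_instance
def pvWitness_can_form_string_with_same_letters_py : (List (String × Int)) × Int := ([("a", 3), ("b", 1)], 2)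
def Spec_can_form_string_with_same_letters_py (char_count : List (String × Int)) (replacement_times : Int) (out : Bool) : Prop := out = can_form_string_with_same_letters_py_alt char_count replacement_times
instance (char_count : List (String × Int)) (replacement_times : Int) (out : Bool) : Decidable (Spec_can_form_string_with_same_letters_py char_count replacement_times out) := by unfold Spec_can_form_string_with_same_letters_py; infer_instance

-- ===== CLAIM (what is proved, stated in full; the proofs are below) =====
def Claim_equal_can_form_string_with_same_letters_py : Prop := ∀ (char_count : List (String × Int)) (replacement_times : Int), Dom_can_form_string_with_same_letters_py char_count replacement_times → Pre_can_form_string_with_same_letters_py char_count replacement_times → Spec_can_form_string_with_same_letters_py char_count replacement_times (can_form_string_with_same_letters_py char_count replacement_times)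

-- ===== LEMMAS AND PROOFS =====

-- If no element of l has key k, A's loop adds up all the values.
theorem pv_foldl_skip_none (l : List (String × Int)) (k : String) (init : Int)
    (h : ∀ p ∈ l, p.1 ≠ k) :
    l.foldl (fun t p => if p.1 ≠ k then t + p.2 else t) init
      = init + (l.map Prod.snd).sum := by
  induction l generalizing init with
  | nil => simp
  | cons q t ih =>
    have hq : q.1 ≠ k := h q (by simp)
    simp only [List.foldl_cons, List.map_cons, List.sum_cons, if_pos hq]
    rw [ih _ (fun p hp => h p (by simp [hp]))]
    omega

-- With nodup keys and one element p0 of key k, A's loop = (sum of all values) - p0.2.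
theorem pv_foldl_skip_one (l : List (String × Int)) (k : String) (init : Int)
    (hnd : (l.map Prod.fst).Nodup) (p0 : String × Int) (hp0 : p0 ∈ l) (hk : p0.1 = k) :
    l.foldl (fun t p => if p.1 ≠ k then t + p.2 else t) init
      = init + (l.map Prod.snd).sum - p0.2 := by
  induction l generalizing init with
  | nil => cases hp0
  | cons q t ih =>
    simp only [List.map_cons, List.nodup_cons] at hnd
    simp only [List.foldl_cons, List.map_cons, List.sum_cons]
    rcases List.mem_cons.mp hp0 with h0 | h0
    · subst h0
      rw [if_neg (by simp [hk]), pv_foldl_skip_none t k init (fun p hp hpk => hnd.1 (by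
        rw [hk]; exact List.mem_map.mpr ⟨p, hp, hpk⟩))]
      omega
    · have hq : q.1 ≠ k := fun hqk => hnd.1 (by
        rw [hqk, ← hk]; exact List.mem_map.mpr ⟨p0, h0, rfl⟩)
      rw [if_pos hq, ih _ hnd.2 h0]
      omega

-- B's running sum is the list sum.
theorem pv_foldl_id_sum (l : List Int) : l.foldl (· + ·) 0 = l.sum := by
  have := PySem.List.foldl_add l (fun x => x) 0
  simpa using this

-- The existence test equals the threshold test at a maximal element.
theorem pv_any_eq_max (l : List Int) (m S r : Int) (hm : m ∈ l) (hmax : ∀ v ∈ l, v ≤ m) :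
    (l.any (fun c => decide (S - c ≤ r))) = decide (S - m ≤ r) := by
  by_cases h : S - m ≤ r
  · simp only [decide_eq_true h, List.any_eq_true]
    exact ⟨m, hm, decide_eq_true h⟩
  · simp only [decide_eq_false h, List.any_eq_false]
    intro c hc
    have := hmax c hc
    simp only [decide_eq_true_eq]
    omega

-- ===== VERDICT (by name: the statement is the Claim_ definition above) =====
theorem can_form_string_with_same_letters_py_spec : Claim_equal_can_form_string_with_same_letters_py := by
  intro cc r _hdom hpre
  unfold Spec_can_form_string_with_same_letters_py
  unfold can_form_string_with_same_letters_py can_form_string_with_same_letters_py_alt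
  set d := PySem.Dict.ofList cc with hd
  have hnd : d.keys.Nodup := PySem.Dict.nodup_keys_ofList cc
  -- keys are nonempty
  have hkeys : d.keys ≠ [] := by
    obtain ⟨p, t, rfl⟩ := List.exists_cons_of_ne_nil hpre
    have hmem : p.1 ∈ d.keys := by
      have : d.keys = PySem.Set.ofList (((p :: t).map Prod.fst)) := by
        rw [hd]
        have : PySem.Dict.ofList (p :: t)
            = (p :: t).foldl (fun d q => d.insert q.1 q.2) PySem.Dict.empty := rfl
        rw [this, PySem.Dict.keys_foldl_insert_key (p :: t) Prod.fst (fun d q => q.2)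
          PySem.Dict.empty]
        exact PySem.Set.update_nil_left _
      rw [this]
      exact (PySem.Set.mem_ofList _ _).mpr (by simp)
    intro hnil; rw [hnil] at hmem; cases hmem
  -- A's max over keys returns some k
  obtain ⟨k, hkA⟩ : ∃ k, PySem.List.max? d.keys (fun c => d.getD c 0) = some k := by
    cases h : PySem.List.max? d.keys (fun c => d.getD c 0) with
    | none => exact absurd ((PySem.List.max?_eq_none_iff _ _).mp h) hkeys
    | some k => exact ⟨k, rfl⟩
  simp only [hkA]
  -- the item carrying key k
  have hkmem : k ∈ d.keys := PySem.List.max?_mem hkA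
  obtain ⟨p0, hp0, hp0k⟩ : ∃ p ∈ d.items, p.1 = k := by
    obtain ⟨p, hp, hpk⟩ := List.mem_map.mp hkmem
    exact ⟨p, hp, hpk⟩
  have hvk : d.getD k 0 = p0.2 := by
    exact PySem.Dict.getD_of_mem_items d (k := k) (v := p0.2) (by rw [← hp0k]; exact hp0) hnd 0
  -- p0.2 is maximal among the values
  have hmaxv : ∀ v ∈ d.values, v ≤ p0.2 := by
    intro v hv
    obtain ⟨q, hq, hq2⟩ := List.mem_map.mp hv
    have hqk : q.1 ∈ d.keys := List.mem_map.mpr ⟨q, hq, rfl⟩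
    have := PySem.List.max?_isMax hkA _ hqk
    have hgq : d.getD q.1 0 = q.2 := PySem.Dict.getD_of_mem_items d hq hnd 0
    rw [hgq, hvk] at this
    omega
  have hvmem : p0.2 ∈ d.values := List.mem_map.mpr ⟨p0, hp0, rfl⟩
  -- rewrite both sides
  rw [pv_foldl_skip_one d.items k 0 hnd p0 hp0 hp0k, pv_foldl_id_sum,
    pv_any_eq_max d.values p0.2 _ r hvmem hmaxv]
  have hsum : (d.items.map Prod.snd).sum = d.values.sum := by
    simp [PySem.Dict.values]
  rw [hsum]
  rw [zero_add]
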